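-- pv_equiv track=rewrite | github.com/rakim0/Advent-of-Code | 2024/day11/main.py | get_half
-- ===== SOURCE A (Python) =====
-- def count_digit(n):
--     cnt = 0
--     while n > 0:
--         n //= 10
--         cnt += 1
--     return cnt
--
-- def get_half(n):
--     l = count_digit(n)
--     left = 0
--     for i in range(l // 2):
--         left += (n % 10) * (10**i)
--         n //= 10
--     right = 0
--     for i in range(l // 2):
--         right += (n % 10) * (10**i)
--         n //= 10
--     return (left, right)
-- ===== SOURCE B (Python) =====
-- def count_digit(n):
--     cnt = 0
--     while n > 0:
--         n //= 10
--         cnt += 1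
--     return cnt
--
-- def get_half(n):
--     p = 10 ** (count_digit(n) // 2)
--     return (n % p, (n // p) % p)
-- ===== Notes on version B (the rewrite author's own statement) =====
-- stated objective: simpler
-- what changed: get_half's two digit-extraction loops are replaced by one closed-form modular computation: p = 10**(count_digit(n)//2), returning (n % p, (n // p) % p).
import Mathlib
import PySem

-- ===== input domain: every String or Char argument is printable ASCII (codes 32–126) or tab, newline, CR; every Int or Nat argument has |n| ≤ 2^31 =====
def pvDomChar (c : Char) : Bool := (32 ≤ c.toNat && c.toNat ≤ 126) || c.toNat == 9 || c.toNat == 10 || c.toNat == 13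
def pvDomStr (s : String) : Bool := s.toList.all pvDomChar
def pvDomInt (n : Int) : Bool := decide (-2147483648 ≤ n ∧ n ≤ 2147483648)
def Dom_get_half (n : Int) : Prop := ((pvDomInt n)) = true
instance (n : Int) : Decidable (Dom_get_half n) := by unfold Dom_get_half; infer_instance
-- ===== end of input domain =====

-- B replaces A's two digit-extraction loops in get_half by a single closed-form modular
-- computation (low half = n % 10^(l//2), high half = (n // 10^(l//2)) % 10^(l//2)); objective: simpler.


-- ===== PORT A =====
-- while n > 0: n //= 10; cnt += 1
def count_digit_go (n cnt : Int) : Int :=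
  if 0 < n then count_digit_go (PySem.Int.floordiv n 10) (cnt + 1) else cnt
termination_by n.toNat
decreasing_by
  rw [PySem.Int.floordiv_eq_ediv_of_pos (by norm_num : (0:Int) < 10)]
  omega

def count_digit (n : Int) : Int := count_digit_go n 0

-- 10**i is ported as 10 ^ i.toNat: every i produced by range(l // 2) is nonnegative, so this is exact.
def get_half (n : Int) : Int × Int :=
  let l := count_digit n
  let s1 := (PySem.List.pyRange 0 (PySem.Int.floordiv l 2) 1).foldl
      (fun (st : Int × Int) i =>
        (st.1 + PySem.Int.mod st.2 10 * 10 ^ i.toNat, PySem.Int.floordiv st.2 10)) (0, n)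
  let s2 := (PySem.List.pyRange 0 (PySem.Int.floordiv l 2) 1).foldl
      (fun (st : Int × Int) i =>
        (st.1 + PySem.Int.mod st.2 10 * 10 ^ i.toNat, PySem.Int.floordiv st.2 10)) (0, s1.2)
  (s1.1, s2.1)

-- ===== PORT B =====
-- B keeps count_digit unchanged (its own copy).
def count_digit_alt_go (n cnt : Int) : Int :=
  if 0 < n then count_digit_alt_go (PySem.Int.floordiv n 10) (cnt + 1) else cnt
termination_by n.toNat
decreasing_by
  rw [PySem.Int.floordiv_eq_ediv_of_pos (by norm_num : (0:Int) < 10)]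
  omega

def count_digit_alt (n : Int) : Int := count_digit_alt_go n 0

-- 10 ** (count_digit(n) // 2) ported with a toNat exponent: count_digit(n) // 2 is nonnegative, so this is exact.
def get_half_alt (n : Int) : Int × Int :=
  let p := (10:Int) ^ (PySem.Int.floordiv (count_digit_alt n) 2).toNat
  (PySem.Int.mod n p, PySem.Int.mod (PySem.Int.floordiv n p) p)

-- ===== PRECONDITION & SPEC =====
def Spec_get_half (n : Int) (out : Int × Int) : Prop := out = get_half_alt n
instance (n : Int) (out : Int × Int) : Decidable (Spec_get_half n out) := by unfold Spec_get_half; infer_instance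

-- ===== CLAIM (what is proved, stated in full; the proofs are below) =====
def Claim_equal_get_half : Prop := ∀ (n : Int), Dom_get_half n → Spec_get_half n (get_half n)

-- ===== LEMMAS AND PROOFS =====

theorem count_digit_alt_go_eq (n cnt : Int) : count_digit_alt_go n cnt = count_digit_go n cnt := by
  fun_induction count_digit_go n cnt with
  | case1 n cnt h ih => rw [count_digit_alt_go, if_pos h, ih]
  | case2 n cnt h => rw [count_digit_alt_go, if_neg h]

theorem count_digit_go_nonneg (n cnt : Int) (h : 0 ≤ cnt) : 0 ≤ count_digit_go n cnt := by
  fun_induction count_digit_go n cnt with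
  | case1 n cnt hp ih => exact ih (by omega)
  | case2 n cnt hp => exact h

-- mixed-radix split of an Euclidean remainder (holds for every n, positive a and b)
theorem emod_split (n a b : Int) (ha : 0 < a) (hb : 0 < b) :
    n % (a * b) = n % a + n / a % b * a := by
  have h1 : a * (n / a) + n % a = n := Int.mul_ediv_add_emod n a
  have h2 : b * (n / a / b) + n / a % b = n / a := Int.mul_ediv_add_emod (n / a) b
  have hr0 : 0 ≤ n % a := Int.emod_nonneg n (by omega)
  have hr1 : n % a < a := Int.emod_lt_of_pos n ha
  have hs0 : 0 ≤ n / a % b := Int.emod_nonneg _ (by omega)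
  have hs1 : n / a % b < b := Int.emod_lt_of_pos _ hb
  have key : n = n % a + n / a % b * a + a * b * (n / a / b) := by nlinarith
  calc n % (a * b) = (n % a + n / a % b * a + a * b * (n / a / b)) % (a * b) := by rw [← key]
    _ = (n % a + n / a % b * a) % (a * b) := Int.add_mul_emod_self_left _ _ _
    _ = n % a + n / a % b * a := Int.emod_eq_of_lt (by nlinarith) (by nlinarith)

theorem fold_digits (n : Int) (k : Nat) :
    (PySem.List.pyRange 0 (k : Int) 1).foldl
      (fun (st : Int × Int) i =>
        (st.1 + PySem.Int.mod st.2 10 * 10 ^ i.toNat, PySem.Int.floordiv st.2 10)) (0, n)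
      = (n % 10 ^ k, n / 10 ^ k) := by
  induction k with
  | zero => simp [PySem.List.pyRange_one_eq_nil (le_refl (0 : Int))]
  | succ k ih =>
      have hsplit : PySem.List.pyRange 0 ((k + 1 : Nat) : Int) 1
          = PySem.List.pyRange 0 (k : Int) 1 ++ [(k : Int)] := by
        have := PySem.List.pyRange_one_succ_right (a := 0) (b := (k : Int)) (by positivity)
        push_cast
        exact this
      rw [hsplit, List.foldl_append, ih]
      simp only [List.foldl_cons, List.foldl_nil]
      rw [PySem.Int.mod_eq_emod_of_pos (by norm_num),
          PySem.Int.floordiv_eq_ediv_of_pos (by norm_num)]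
      have hm : n % 10 ^ k + n / 10 ^ k % 10 * 10 ^ (k : Int).toNat = n % 10 ^ (k + 1) := by
        rw [Int.toNat_natCast, pow_succ, emod_split n (10 ^ k) 10 (by positivity) (by norm_num)]
      have hd : n / 10 ^ k / 10 = n / 10 ^ (k + 1) := by
        rw [pow_succ, Int.ediv_ediv_of_nonneg (by positivity)]
      rw [hm, hd]

-- ===== VERDICT (by name: the statement is the Claim_ definition above) =====
theorem count_digit_alt_eq (n : Int) : count_digit_alt n = count_digit n := by
  rw [count_digit_alt, count_digit, count_digit_alt_go_eq]

theorem get_half_spec : Claim_equal_get_half := by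
  intro n _
  unfold Spec_get_half get_half get_half_alt
  rw [count_digit_alt_eq]
  have hnn : (0:Int) ≤ PySem.Int.floordiv (count_digit n) 2 := by
    rw [PySem.Int.floordiv_eq_ediv_of_pos (by norm_num : (0:Int) < 2)]
    exact Int.ediv_nonneg (count_digit_go_nonneg n 0 le_rfl) (by norm_num)
  have h2 : PySem.Int.floordiv (count_digit n) 2
      = (((PySem.Int.floordiv (count_digit n) 2).toNat : Nat) : Int) :=
    (Int.toNat_of_nonneg hnn).symm
  set k := (PySem.Int.floordiv (count_digit n) 2).toNat with hk
  have hp : (0:Int) < 10 ^ k := by positivity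
  simp only [h2, fold_digits, PySem.Int.mod_eq_emod_of_pos hp,
    PySem.Int.floordiv_eq_ediv_of_pos hp]
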